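-- pv_equiv track=rewrite | github.com/RamananVr/Leetcodepython | arrays/2757_generate_circular_array_values.py | generateCircularArrayMath
-- ===== SOURCE A (Python) =====
-- from typing import List
--
-- def generateCircularArrayMath(n: int, start: int) -> List[int]:
--     """
--     Mathematical approach using formula derivation.
--
--     For each position i, we can derive the value directly:
--     nums[i] = (start + sum(1 to i)) % n
--     sum(1 to i) = i * (i + 1) / 2
--
--     Args:
--         n: Length of array and modulo base
--         start: Starting value
--
--     Returns:
--         Generated circular array
--
--     Time Complexity: O(n)
--     Space Complexity: O(n)
--     """
--     result = []
--     start_mod = start % n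
--
--     for i in range(n):
--         # Sum from 1 to i = i * (i + 1) // 2
--         sum_to_i = i * (i + 1) // 2
--         value = (start_mod + sum_to_i) % n
--         result.append(value)
--
--     return result
-- ===== SOURCE B (Python) =====
-- def generateCircularArrayMath(n: int, start: int):
--     # Running cumulative-sum accumulator instead of recomputing i*(i+1)//2 each step.
--     cur = start % n
--     result = []
--     for i in range(n):
--         result.append(cur)
--         cur = (cur + i + 1) % n
--     return result
-- ===== Notes on version B (the rewrite author's own statement) =====
-- stated objective: faster
-- what changed: Replaces the per-step closed-form triangular-number computation i*(i+1)//2 followed by a full mod of a growing sum with a running accumulator cur kept reduced modulo n and updated incrementally each iteration.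
import Mathlib
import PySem

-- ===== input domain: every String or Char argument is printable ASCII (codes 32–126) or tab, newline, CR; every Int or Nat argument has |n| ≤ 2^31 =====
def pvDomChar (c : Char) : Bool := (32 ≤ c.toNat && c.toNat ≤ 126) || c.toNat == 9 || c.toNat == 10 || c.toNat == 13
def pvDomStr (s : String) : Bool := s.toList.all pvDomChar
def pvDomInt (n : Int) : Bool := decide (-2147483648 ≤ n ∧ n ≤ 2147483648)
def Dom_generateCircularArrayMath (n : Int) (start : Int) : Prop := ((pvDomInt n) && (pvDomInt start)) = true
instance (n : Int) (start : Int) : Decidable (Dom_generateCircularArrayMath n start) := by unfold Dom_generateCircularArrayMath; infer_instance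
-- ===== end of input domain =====

-- ===== PORT A =====
-- A: for each i in range(n), value = (start % n + i*(i+1)//2) % n, appended to result.
def generateCircularArrayMath (n : Int) (start : Int) : List Int :=
  let startMod := PySem.Int.mod start n
  (PySem.List.pyRange 0 n 1).foldl
    (fun result i =>
      let sumToI := PySem.Int.floordiv (i * (i + 1)) 2
      let value := PySem.Int.mod (startMod + sumToI) n
      result ++ [value]) []

-- ===== PORT B =====
-- B: running accumulator cur, appended then updated cur = (cur + i + 1) % n.
def generateCircularArrayMath_alt (n : Int) (start : Int) : List Int :=
  let cur := PySem.Int.mod start n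
  ((PySem.List.pyRange 0 n 1).foldl
    (fun (st : List Int × Int) i => (st.1 ++ [st.2], PySem.Int.mod (st.2 + i + 1) n))
    ([], cur)).1

-- ===== PRECONDITION & SPEC =====
-- Pre_ excludes exactly n = 0, where Python's 'start % n' raises ZeroDivisionError in both A and B.
def Pre_generateCircularArrayMath (n : Int) (start : Int) : Prop := n ≠ 0
instance (n : Int) (start : Int) : Decidable (Pre_generateCircularArrayMath n start) := by unfold Pre_generateCircularArrayMath; infer_instance
def pvWitness_generateCircularArrayMath : Int × Int := (5, 3)

def Spec_generateCircularArrayMath (n : Int) (start : Int) (out : List Int) : Prop := out = generateCircularArrayMath_alt n start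
instance (n : Int) (start : Int) (out : List Int) : Decidable (Spec_generateCircularArrayMath n start out) := by unfold Spec_generateCircularArrayMath; infer_instance

-- ===== CLAIM (what is proved, stated in full; the proofs are below) =====
def Claim_equal_generateCircularArrayMath : Prop := ∀ (n : Int) (start : Int), Dom_generateCircularArrayMath n start → Pre_generateCircularArrayMath n start → Spec_generateCircularArrayMath n start (generateCircularArrayMath n start)

-- ===== LEMMAS AND PROOFS =====

-- triangular numbers: sum 1..m
def pvTri : Nat → Nat
  | 0 => 0
  | m + 1 => pvTri m + (m + 1)

lemma pvTri_closed (m : Nat) : (pvTri m : Int) = PySem.Int.floordiv ((m : Int) * ((m : Int) + 1)) 2 := by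
  induction m with
  | zero => decide
  | succ k ih =>
    have h2 : (0:Int) < 2 := by omega
    rw [PySem.Int.floordiv_eq_ediv_of_pos h2] at ih ⊢
    obtain ⟨a, ha⟩ := Int.even_mul_succ_self (k:Int)
    obtain ⟨b, hb⟩ := Int.even_mul_succ_self ((k:Int)+1)
    have e1 : ((k:Int) * ((k:Int) + 1)) / 2 = a := by omega
    have e2 : (((k:Int)+1) * (((k:Int)+1) + 1)) / 2 = b := by omega
    have hab : b + b = a + a + 2 * ((k:Int) + 1) := by rw [← ha, ← hb]; ring
    simp only [pvTri]
    push_cast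
    rw [e1] at ih
    rw [e2]
    omega

-- key mod step for 0 < n
lemma pvModStep (n a b : Int) (hn : 0 < n) :
    PySem.Int.mod (PySem.Int.mod a n + b) n = PySem.Int.mod (a + b) n := by
  rw [PySem.Int.mod_eq_emod_of_pos hn, PySem.Int.mod_eq_emod_of_pos hn,
      PySem.Int.mod_eq_emod_of_pos hn, Int.add_emod, Int.emod_emod_of_dvd _ (dvd_refl n),
      ← Int.add_emod]

-- main invariant over range m (n > 0): B's fold carries (A's list so far, mod (start + tri m) n)
lemma pvMain (n start : Int) (hn : 0 < n) (m : Nat) :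
    ((List.range m).map (fun k : Nat => (0:Int) + (k:Int))).foldl
      (fun (st : List Int × Int) i => (st.1 ++ [st.2], PySem.Int.mod (st.2 + i + 1) n))
      ([], PySem.Int.mod start n)
    = (((List.range m).map (fun k : Nat => (0:Int) + (k:Int))).foldl
        (fun result i =>
          result ++ [PySem.Int.mod (PySem.Int.mod start n + PySem.Int.floordiv (i * (i + 1)) 2) n]) [],
       PySem.Int.mod (PySem.Int.mod start n + (pvTri m : Int)) n) := by
  induction m with
  | zero =>
    have h := pvModStep n start 0 hn
    simp only [add_zero] at h
    simp only [List.range_zero, List.map_nil, List.foldl_nil, pvTri, Nat.cast_zero, add_zero, h]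
  | succ k ih =>
    rw [List.range_succ, List.map_append, List.foldl_append, List.foldl_append, ih]
    simp only [List.map_cons, List.map_nil, List.foldl_cons, List.foldl_nil, Prod.mk.injEq]
    constructor
    · rw [pvTri_closed]
      norm_num
    · rw [add_assoc, pvModStep _ _ _ hn]
      have : PySem.Int.mod start n + (pvTri k : Int) + ((0:Int) + (k:Int) + 1)
           = PySem.Int.mod start n + (pvTri (k+1) : Int) := by
        simp only [pvTri]; push_cast; ring
      rw [this]

-- ===== VERDICT (by name: the statement is the Claim_ definition above) =====
theorem generateCircularArrayMath_spec : Claim_equal_generateCircularArrayMath := by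
  intro n start _ hn
  unfold Spec_generateCircularArrayMath generateCircularArrayMath generateCircularArrayMath_alt
  dsimp only
  rcases lt_or_gt_of_ne hn with hneg | hpos
  · -- n < 0: range is empty, both sides are []
    have h0 : (n - 0).toNat = 0 := by omega
    rw [PySem.List.pyRange_one, h0]
    simp
  · rw [PySem.List.pyRange_one]
    rw [pvMain n start hpos (n - 0).toNat]
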